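-- pv_equiv track=rewrite | github.com/Trinity963/Ethica | modules/worm_bot/modules/markdown_module.py | fix_code
-- ===== SOURCE A (Python) =====
-- def fix_code(code: str) -> str:
--     """Apply safe automatic Markdown fixes."""
--     fixed = code
--     lines = fixed.splitlines()
--     result = []
--     in_code_block = False
--     prev_blank = False
--
--     for line in lines:
--         # Track code blocks
--         if line.strip().startswith("```"):
--             in_code_block = not in_code_block
--             result.append(line)
--             prev_blank = False
--             continue
--
--         if in_code_block:
--             result.append(line)
--             continue
--
--         # Remove trailing whitespace
--         line = line.rstrip()
--
--         # Collapse multiple blank lines into one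
--         if line == "":
--             if prev_blank:
--                 continue
--             prev_blank = True
--         else:
--             prev_blank = False
--
--         # Convert hard tabs to 4 spaces
--         line = line.replace("\t", "    ")
--
--         result.append(line)
--
--     fixed = "\n".join(result)
--
--     # Add H1 if missing
--     if not any(l.startswith("# ") for l in fixed.splitlines()):
--         fixed = "# Document\n\n" + fixed
--
--     return fixed
-- ===== SOURCE B (Python) =====
-- def fix_code(code: str) -> str:
--     """Apply safe automatic Markdown fixes (segment-based rewrite)."""
--     # Pass 1: partition lines into ordered segments tagged verbatim/text,
--     # toggling on fence lines; fence lines are their own verbatim segments.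
--     segments = []
--     cur = []
--     in_code = False
--     for line in code.splitlines():
--         if line.strip().startswith("```"):
--             segments.append((in_code, cur))
--             segments.append((True, [line]))
--             cur = []
--             in_code = not in_code
--         else:
--             cur.append(line)
--     segments.append((in_code, cur))
--
--     # Pass 2: verbatim segments pass through; text segments are rstripped,
--     # blanks directly after a blank are dropped (pairwise), tabs expanded.
--     out = []
--     for verbatim, seg in segments:
--         if verbatim:
--             out.extend(seg)
--         else:
--             ys = [l.rstrip() for l in seg]
--             out.extend(y.replace("\t", "    ")
--                        for y, prev in zip(ys, [None] + ys[:-1])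
--                        if not (y == "" and prev == ""))
--
--     fixed = "\n".join(out)
--     if not any(l.startswith("# ") for l in fixed.splitlines()):
--         fixed = "# Document\n\n" + fixed
--     return fixed
-- ===== Notes on version B (the rewrite author's own statement) =====
-- stated objective: alternative
-- what changed: Replaced A's single-pass state machine (in_code_block/prev_blank flags mutated per line) by a two-pass design: first partition the lines into ordered verbatim/text segments by toggling on fence lines, then format each text segment independently with a pairwise zip(ys, [None]+ys[:-1]) that drops a blank directly after a blank.
import Mathlib
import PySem

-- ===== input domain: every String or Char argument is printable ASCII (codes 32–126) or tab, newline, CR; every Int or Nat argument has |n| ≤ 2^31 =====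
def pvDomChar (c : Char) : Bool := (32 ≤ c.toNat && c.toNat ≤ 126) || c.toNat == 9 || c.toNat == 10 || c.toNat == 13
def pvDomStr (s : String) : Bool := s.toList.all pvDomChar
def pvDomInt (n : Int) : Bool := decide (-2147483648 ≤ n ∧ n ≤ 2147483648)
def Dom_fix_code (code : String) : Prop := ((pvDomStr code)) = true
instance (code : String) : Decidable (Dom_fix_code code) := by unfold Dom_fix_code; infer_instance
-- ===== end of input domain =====

-- B replaces A's single-pass flag machine by a two-pass segment decomposition (partition at
-- fences, then format each text segment pairwise); same cost, alternative structure.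


-- ===== PORT A =====
-- A's per-line loop: state (in_code_block, prev_blank), result built front-to-back.
def fixALoop : List String → Bool → Bool → List String
  | [], _, _ => []
  | line :: rest, inCode, prevBlank =>
    if PySem.Str.startswith (PySem.Str.strip line) "```" then
      line :: fixALoop rest (!inCode) false
    else if inCode then
      line :: fixALoop rest inCode prevBlank
    else
      let l := PySem.Str.rstrip line
      if l == "" then
        if prevBlank then fixALoop rest inCode prevBlank
        else PySem.Str.replace l "\t" "    " :: fixALoop rest inCode true
      else PySem.Str.replace l "\t" "    " :: fixALoop rest inCode false

def pvAddH1 (fixed : String) : String :=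
  if (PySem.Str.splitlines fixed).any (fun l => PySem.Str.startswith l "# ") then fixed
  else "# Document\n\n" ++ fixed

def fix_code (code : String) : String :=
  pvAddH1 (PySem.Str.join "\n" (fixALoop (PySem.Str.splitlines code) false false))

-- ===== PORT B =====
-- B pass 1: partition the lines into (verbatim?, lines) segments, toggling at fence lines.
def segLoop : List String → Bool → List String → List (Bool × List String)
  | [], inCode, cur => [(inCode, cur.reverse)]
  | line :: rest, inCode, cur =>
    if PySem.Str.startswith (PySem.Str.strip line) "```" then
      (inCode, cur.reverse) :: (true, [line]) :: segLoop rest (!inCode) []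
    else segLoop rest inCode (line :: cur)

-- B pass 2 formatter for one text segment: rstrip all lines, then keep a pair (y, prev)
-- unless y is a blank directly after a blank; expand tabs on the kept lines.
def fmtSeg (seg : List String) : List String :=
  ((seg.map PySem.Str.rstrip).zip
      ((none : Option String) :: (seg.map PySem.Str.rstrip).map some)).filterMap
    (fun p => if p.1 == "" && p.2 == some "" then none
              else some (PySem.Str.replace p.1 "\t" "    "))

def fix_code_alt (code : String) : String :=
  pvAddH1 (PySem.Str.join "\n"
    ((segLoop (PySem.Str.splitlines code) false []).flatMap
      (fun s => if s.1 then s.2 else fmtSeg s.2)))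

-- ===== PRECONDITION & SPEC =====
def Spec_fix_code (code : String) (out : String) : Prop := out = fix_code_alt code
instance (code : String) (out : String) : Decidable (Spec_fix_code code out) := by unfold Spec_fix_code; infer_instance

-- ===== CLAIM (what is proved, stated in full; the proofs are below) =====
def Claim_equal_fix_code : Prop := ∀ (code : String), Dom_fix_code code → Spec_fix_code code (fix_code code)

-- ===== LEMMAS AND PROOFS =====

-- A's text-mode processing of a list of lines, started with prev_blank = pb.
def gd : Bool → List String → List String
  | _, [] => []
  | pb, l :: rest =>
    let r := PySem.Str.rstrip l
    if r == "" then
      if pb then gd pb rest else PySem.Str.replace r "\t" "    " :: gd true rest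
    else PySem.Str.replace r "\t" "    " :: gd false rest

-- the prev_blank state after that processing
def gpb : Bool → List String → Bool
  | pb, [] => pb
  | _, l :: rest => gpb (PySem.Str.rstrip l == "") rest

-- gd on already-rstripped lines
def gdr : Bool → List String → List String
  | _, [] => []
  | pb, y :: ys =>
    if y == "" && pb then gdr true ys
    else PySem.Str.replace y "\t" "    " :: gdr (y == "") ys

theorem gd_eq_gdr (ls : List String) (pb : Bool) :
    gd pb ls = gdr pb (ls.map PySem.Str.rstrip) := by
  induction ls generalizing pb with
  | nil => rfl
  | cons l rest ih =>
    simp only [gd, gdr, List.map_cons]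
    by_cases h : PySem.Str.rstrip l = ""
    · cases pb with
      | true => simp [h, ih]
      | false => simp [h, ih]
    · have h' : (PySem.Str.rstrip l == "") = false := by simpa using h
      simp [h', ih]

theorem gd_append (xs ys : List String) (pb : Bool) :
    gd pb (xs ++ ys) = gd pb xs ++ gd (gpb pb xs) ys := by
  induction xs generalizing pb with
  | nil => rfl
  | cons x xs ih =>
    simp only [List.cons_append, gd, gpb]
    by_cases h : PySem.Str.rstrip x = ""
    · cases pb with
      | true => simp [h, ih true]
      | false => simp [h, ih true]
    · have h' : (PySem.Str.rstrip x == "") = false := by simpa using h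
      simp [h', ih false]

theorem gpb_append (xs ys : List String) (pb : Bool) :
    gpb pb (xs ++ ys) = gpb (gpb pb xs) ys := by
  induction xs generalizing pb with
  | nil => rfl
  | cons x xs ih => simp only [List.cons_append, gpb]; exact ih _

theorem zip_filterMap_eq_gdr (ys : List String) (prev : Option String) :
    ((ys.zip (prev :: ys.map some)).filterMap
      (fun p => if p.1 == "" && p.2 == some "" then none
                else some (PySem.Str.replace p.1 "\t" "    ")))
      = gdr (prev == some "") ys := by
  induction ys generalizing prev with
  | nil => rfl
  | cons y ys ih =>
    have hz : ((y :: ys).zip (prev :: (y :: ys).map some))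
        = (y, prev) :: ys.zip (some y :: ys.map some) := by simp
    rw [hz, List.filterMap_cons, ih (some y)]
    by_cases hy : y = ""
    · subst hy
      by_cases hp : prev = some ""
      · subst hp; simp [gdr]
      · have hp' : (prev == some "") = false := by simpa using hp
        simp [gdr, hp']
    · have hy' : (y == "") = false := by simpa using hy
      simp [gdr, hy']

theorem fmtSeg_eq_gd (seg : List String) : fmtSeg seg = gd false seg := by
  rw [gd_eq_gdr]
  have h := zip_filterMap_eq_gdr (seg.map PySem.Str.rstrip) none
  simpa [fmtSeg] using h

-- Main bridge: B's segmentation emits exactly what A's loop emits, up to the pending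
-- current segment (already emitted by A, still pending in B's accumulator).
theorem segLoop_main (lines : List String) (inCode : Bool) (cur : List String) :
    (segLoop lines inCode cur).flatMap (fun s => if s.1 then s.2 else fmtSeg s.2)
      = (if inCode then cur.reverse else gd false cur.reverse)
        ++ fixALoop lines inCode (if inCode then false else gpb false cur.reverse) := by
  induction lines generalizing inCode cur with
  | nil => cases inCode <;> simp [segLoop, fixALoop, fmtSeg_eq_gd]
  | cons line rest ih =>
    by_cases hf : PySem.Str.startswith (PySem.Str.strip line) "```" = true
    · simp only [segLoop, fixALoop, hf, if_true, List.flatMap_cons]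
      rw [ih (!inCode) []]
      cases inCode <;> simp [fmtSeg_eq_gd, gd, gpb]
    · rw [Bool.not_eq_true] at hf
      simp only [segLoop, fixALoop, hf, Bool.false_eq_true, if_false]
      cases inCode with
      | true =>
        rw [ih true (line :: cur)]
        simp
      | false =>
        rw [ih false (line :: cur)]
        simp only [List.reverse_cons, Bool.false_eq_true, if_false]
        rw [gd_append, gpb_append]
        by_cases hb : PySem.Str.rstrip line = ""
        · cases hpb : gpb false cur.reverse with
          | true => simp [gd, gpb, hb]
          | false => simp [gd, gpb, hb]
        · have hb' : (PySem.Str.rstrip line == "") = false := by simpa using hb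
          simp [gd, gpb, hb']

-- ===== VERDICT (by name: the statement is the Claim_ definition above) =====
theorem fix_code_spec : Claim_equal_fix_code := by
  intro code _
  unfold Spec_fix_code fix_code fix_code_alt
  rw [segLoop_main (PySem.Str.splitlines code) false []]
  simp [gd, gpb]
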